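-- pv_equiv track=rewrite | github.com/TrueV1sion/ai-roadtrip-storyteller | roadtrip_kg_mcp/knowledge_graph/core/embeddings.py | build_file_context
-- ===== SOURCE A (Python) =====
-- def build_file_context(file_path: str, content: str) -> str:
--     """Build context string for a file"""
--     file_type = file_path.split('.')[-1] if '.' in file_path else 'unknown'
--
--     context_parts = [
--         f"FILE: {file_path}",
--         f"TYPE: {file_type}",
--     ]
--
--     # Extract key elements
--     if file_type == 'py':
--         imports = [line for line in content.split('\n') if line.strip().startswith(('import', 'from'))]
--         classes = [line for line in content.split('\n') if 'class ' in line]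
--         functions = [line for line in content.split('\n') if 'def ' in line]
--
--         if imports:
--             context_parts.append(f"IMPORTS: {len(imports)} modules")
--         if classes:
--             context_parts.append(f"CLASSES: {len(classes)} defined")
--         if functions:
--             context_parts.append(f"FUNCTIONS: {len(functions)} defined")
--
--     # Add content summary
--     context_parts.append(f"CONTENT: {content[:500]}")
--
--     return ' | '.join(context_parts)
-- ===== SOURCE B (Python) =====
-- def build_file_context(file_path: str, content: str) -> str:
--     """Build context string for a file (direct string accumulation, single counting pass)"""
--     if '.' in file_path:
--         file_type = file_path.split('.')[-1]
--     else:
--         file_type = 'unknown'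
--
--     result = f"FILE: {file_path} | TYPE: {file_type}"
--
--     if file_type == 'py':
--         imports = classes = functions = 0
--         for line in content.split('\n'):
--             if line.strip().startswith(('import', 'from')):
--                 imports += 1
--             if 'class ' in line:
--                 classes += 1
--             if 'def ' in line:
--                 functions += 1
--         for label, n, noun in (('IMPORTS', imports, 'modules'),
--                                ('CLASSES', classes, 'defined'),
--                                ('FUNCTIONS', functions, 'defined')):
--             if n:
--                 result += f" | {label}: {n} {noun}"
--
--     return result + f" | CONTENT: {content[:500]}"
-- ===== Notes on version B (the rewrite author's own statement) =====
-- stated objective: simpler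
-- what changed: B builds the result string directly by concatenation instead of collecting parts and joining, splits the content once and counts imports/classes/functions with three counters in a single pass, and emits the three summary segments from a small (label, count, noun) table instead of three separate list-comprehension/append blocks.
import Mathlib
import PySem

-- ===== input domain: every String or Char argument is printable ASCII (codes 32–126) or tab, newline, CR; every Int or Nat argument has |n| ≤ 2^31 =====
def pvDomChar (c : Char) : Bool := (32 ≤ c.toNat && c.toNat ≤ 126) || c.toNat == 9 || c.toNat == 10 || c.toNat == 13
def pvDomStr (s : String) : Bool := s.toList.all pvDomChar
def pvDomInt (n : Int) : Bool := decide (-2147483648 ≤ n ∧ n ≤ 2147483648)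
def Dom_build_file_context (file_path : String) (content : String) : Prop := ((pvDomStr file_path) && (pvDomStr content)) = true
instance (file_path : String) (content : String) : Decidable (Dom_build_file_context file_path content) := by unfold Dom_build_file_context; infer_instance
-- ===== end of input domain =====

-- B builds the result by direct string concatenation (no parts list, no join), counts the three
-- line kinds in a single pass over one split, and emits the summaries from a (label, count, noun)
-- table (objective: simpler; same asymptotic cost).

-- ===== PORT A =====
-- line.strip().startswith(('import', 'from'))
def pvIsImport (line : String) : Bool :=
  PySem.Str.startswith (PySem.Str.strip line) "import" ||
  PySem.Str.startswith (PySem.Str.strip line) "from"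

def build_file_context (file_path : String) (content : String) : String :=
  let file_type :=
    if PySem.Str.isIn "." file_path then
      ((PySem.List.pyGet? ((PySem.Str.split? file_path ".").getD []) (-1)).getD "")  -- [-1]: split is nonempty, default unreachable
    else "unknown"
  let context_parts := ["FILE: " ++ file_path, "TYPE: " ++ file_type]
  let context_parts :=
    if file_type == "py" then
      let imports := ((PySem.Str.split? content "\n").getD []).filter pvIsImport
      let classes := ((PySem.Str.split? content "\n").getD []).filter (fun line => PySem.Str.isIn "class " line)
      let functions := ((PySem.Str.split? content "\n").getD []).filter (fun line => PySem.Str.isIn "def " line)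
      let context_parts :=
        if imports ≠ [] then
          context_parts ++ ["IMPORTS: " ++ PySem.Int.toStr (imports.length : Int) ++ " modules"]
        else context_parts
      let context_parts :=
        if classes ≠ [] then
          context_parts ++ ["CLASSES: " ++ PySem.Int.toStr (classes.length : Int) ++ " defined"]
        else context_parts
      if functions ≠ [] then
        context_parts ++ ["FUNCTIONS: " ++ PySem.Int.toStr (functions.length : Int) ++ " defined"]
      else context_parts
    else context_parts
  let context_parts := context_parts ++ ["CONTENT: " ++ PySem.Str.slice content none (some 500)]
  PySem.Str.join " | " context_parts

-- ===== PORT B =====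
-- the counting loop body: three independent increments per line
def pvCountStep (acc : Int × Int × Int) (line : String) : Int × Int × Int :=
  let acc :=
    if PySem.Str.startswith (PySem.Str.strip line) "import" ||
       PySem.Str.startswith (PySem.Str.strip line) "from" then
      (acc.1 + 1, acc.2.1, acc.2.2) else acc
  let acc :=
    if PySem.Str.isIn "class " line then (acc.1, acc.2.1 + 1, acc.2.2) else acc
  if PySem.Str.isIn "def " line then (acc.1, acc.2.1, acc.2.2 + 1) else acc

-- the summary loop body: append " | {label}: {n} {noun}" when n is truthy
def pvAppendSummary (acc : String) (t : String × Int × String) : String :=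
  if t.2.1 ≠ 0 then acc ++ " | " ++ t.1 ++ ": " ++ PySem.Int.toStr t.2.1 ++ " " ++ t.2.2 else acc

def build_file_context_alt (file_path : String) (content : String) : String :=
  let file_type :=
    if PySem.Str.isIn "." file_path then
      ((PySem.List.pyGet? ((PySem.Str.split? file_path ".").getD []) (-1)).getD "")
    else "unknown"
  let result := "FILE: " ++ file_path ++ " | TYPE: " ++ file_type
  let result :=
    if file_type == "py" then
      let counts : Int × Int × Int :=
        ((PySem.Str.split? content "\n").getD []).foldl pvCountStep (0, 0, 0)
      [("IMPORTS", counts.1, "modules"),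
       ("CLASSES", counts.2.1, "defined"),
       ("FUNCTIONS", counts.2.2, "defined")].foldl pvAppendSummary result
    else result
  result ++ " | CONTENT: " ++ PySem.Str.slice content none (some 500)

-- ===== PRECONDITION & SPEC =====
def Spec_build_file_context (file_path : String) (content : String) (out : String) : Prop := out = build_file_context_alt file_path content
instance (file_path : String) (content : String) (out : String) : Decidable (Spec_build_file_context file_path content out) := by unfold Spec_build_file_context; infer_instance

-- ===== CLAIM =====
def Claim_equal_build_file_context : Prop := ∀ (file_path : String) (content : String), Dom_build_file_context file_path content → Spec_build_file_context file_path content (build_file_context file_path content)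

-- ===== LEMMAS AND PROOFS =====

-- the counting fold computes the three filter lengths, shifted by the initial accumulator
theorem pvFold_counts (lines : List String) (a b c : Int) :
    lines.foldl pvCountStep (a, b, c) =
      (a + ((lines.filter pvIsImport).length : Int),
       b + ((lines.filter (fun line => PySem.Str.isIn "class " line)).length : Int),
       c + ((lines.filter (fun line => PySem.Str.isIn "def " line)).length : Int)) := by
  induction lines generalizing a b c with
  | nil => simp
  | cons l t ih =>
    simp only [List.foldl_cons, List.filter_cons]
    rw [show pvCountStep (a, b, c) l =
        ((if pvIsImport l then a + 1 else a),
         (if PySem.Str.isIn "class " l then b + 1 else b),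
         (if PySem.Str.isIn "def " l then c + 1 else c)) by
      simp only [pvCountStep, pvIsImport]; split_ifs <;> rfl]
    rw [ih]
    split_ifs <;> simp [Prod.ext_iff] <;> omega

theorem pvFilter_len_ne (p : String → Bool) (lines : List String) :
    (((lines.filter p).length : Int) ≠ 0) ↔ (lines.filter p ≠ []) := by
  simp [List.length_eq_zero_iff]

-- ===== VERDICT =====
theorem build_file_context_spec : Claim_equal_build_file_context := by
  intro file_path content _
  unfold Spec_build_file_context build_file_context build_file_context_alt
  simp only [pvFold_counts, zero_add, List.foldl_cons, List.foldl_nil, pvAppendSummary,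
    pvFilter_len_ne]
  split_ifs <;>
    (apply String.ext; simp [PySem.Str.join, PySem.Chars.join, List.intercalate, List.intersperse, List.append_assoc])
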